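-- pv_equiv track=rewrite | github.com/lolguinan/aoc-py | src/year2021/day05b.py | apply_points
-- ===== SOURCE A (Python) =====
-- def apply_points(
--     line_segments: list[list[int]],
-- ) -> dict[tuple[int, int], list[list[int]]]:
--     grid = {}
--     for line_segment in line_segments:
--         x1, y1, x2, y2 = line_segment
--
--         min_x = min(x1, x2)
--         max_x = max(x1, x2)
--         min_y = min(y1, y2)
--         max_y = max(y1, y2)
--
--         # horizontal
--         if min_x == max_x:
--             for y in range(min_y, max_y + 1):
--                 grid.setdefault((min_x, y), []).append(line_segment)
--
--         # vertical
--         elif min_y == max_y: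
--             for x in range(min_x, max_x + 1):
--                 grid.setdefault((x, min_y), []).append(line_segment)
--
--         # 45 degree diagonal
--         else:
--             dx = -1 if x1 > x2 else 1
--             dy = -1 if y1 > y2 else 1
--             for step in range(max_x - min_x + 1):
--                 xy = (x1 + (step * dx), y1 + (step * dy))
--                 grid.setdefault(xy, []).append(line_segment)
--
--     return grid
-- ===== SOURCE B (Python) =====
-- def _points(seg):
--     # the grid points a segment covers, as one list
--     x1, y1, x2, y2 = seg
--     if x1 == x2 or y1 == y2:
--         # axis-aligned (or a single point): a cartesian product, one axis degenerate
--         return [(x, y)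
--                 for x in range(min(x1, x2), max(x1, x2) + 1)
--                 for y in range(min(y1, y2), max(y1, y2) + 1)]
--     # x-driven diagonal, unit y-step toward y2
--     xs = list(range(x1, x2 + 1)) or list(range(x1, x2 - 1, -1))
--     sy = 1 if y2 > y1 else -1
--     return [(x, y1 + i * sy) for i, x in enumerate(xs)]
--
--
-- def apply_points(
--     line_segments: list[list[int]],
-- ) -> dict[tuple[int, int], list[list[int]]]:
--     # staged pipeline: enumerate all (point, segment) pairs, then dedup the
--     # keys in first-seen order and gather each key's segments in one scan
--     pairs = [(pt, seg) for seg in line_segments for pt in _points(seg)]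
--     keys = dict.fromkeys(pt for pt, _ in pairs)
--     return {pt: [s for q, s in pairs if q == pt] for pt in keys}
-- ===== Notes on version B (the rewrite author's own statement) =====
-- stated objective: alternative
-- what changed: A's single pass that mutates a dict via setdefault while branch-dispatching on orientation is replaced by a staged pipeline: a pure per-segment point list (cartesian product for axis-aligned segments, an enumerate-zip over the x-range for diagonals), flattened into (point, segment) pairs, then dict.fromkeys dedup of the keys and one gathering scan per key.
import Mathlib
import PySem

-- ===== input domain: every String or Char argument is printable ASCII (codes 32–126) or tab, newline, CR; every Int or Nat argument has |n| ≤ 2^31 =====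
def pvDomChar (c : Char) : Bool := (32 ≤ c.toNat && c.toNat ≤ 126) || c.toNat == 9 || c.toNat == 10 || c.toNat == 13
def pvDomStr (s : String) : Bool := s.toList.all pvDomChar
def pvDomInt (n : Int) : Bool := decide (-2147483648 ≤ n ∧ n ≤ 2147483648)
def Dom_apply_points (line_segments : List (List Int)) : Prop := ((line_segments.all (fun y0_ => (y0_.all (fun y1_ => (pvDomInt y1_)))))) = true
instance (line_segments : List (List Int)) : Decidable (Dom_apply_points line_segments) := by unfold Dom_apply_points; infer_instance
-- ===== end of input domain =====

-- B replaces A's setdefault-mutating orientation-branch loop by a staged pipeline: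
-- per-segment point lists, flattened to (point, segment) pairs, then key dedup and a gather scan per key (objective: alternative).

-- ===== PORT A =====
-- grid.setdefault(k, []).append(seg)  ==  d.modify k [] (· ++ [seg])  (new key appended at the end, existing key updated in place)
def pvStepA (grid : PySem.Dict (Int × Int) (List (List Int))) (seg : List Int) :
    PySem.Dict (Int × Int) (List (List Int)) :=
  match seg with
  | [x1, y1, x2, y2] =>
    let min_x := min x1 x2
    let max_x := max x1 x2
    let min_y := min y1 y2
    let max_y := max y1 y2
    if min_x = max_x then
      -- horizontal
      (PySem.List.pyRange min_y (max_y + 1) 1).foldl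
        (fun g y => g.modify (min_x, y) [] (· ++ [seg])) grid
    else if min_y = max_y then
      -- vertical
      (PySem.List.pyRange min_x (max_x + 1) 1).foldl
        (fun g x => g.modify (x, min_y) [] (· ++ [seg])) grid
    else
      -- 45 degree diagonal
      let dx : Int := if x1 > x2 then -1 else 1
      let dy : Int := if y1 > y2 then -1 else 1
      (PySem.List.pyRange 0 (max_x - min_x + 1) 1).foldl
        (fun g step => g.modify (x1 + step * dx, y1 + step * dy) [] (· ++ [seg])) grid
  | _ => grid  -- unreachable under Pre_ (Python raises unpacking the segment)

def apply_points (line_segments : List (List Int)) : List (Int × Int × List (List Int)) :=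
  ((line_segments.foldl pvStepA PySem.Dict.empty).items).map (fun p => (p.1.1, p.1.2, p.2))

-- ===== PORT B =====
-- _points(seg): cartesian-product comprehension for axis-aligned segments, enumerate over the x-range for diagonals
def pvPointsB (seg : List Int) : List (Int × Int) :=
  match seg with
  | [x1, y1, x2, y2] =>
    if x1 = x2 ∨ y1 = y2 then
      (PySem.List.pyRange (min x1 x2) (max x1 x2 + 1) 1).flatMap
        (fun x => (PySem.List.pyRange (min y1 y2) (max y1 y2 + 1) 1).map (fun y => (x, y)))
    else
      -- xs = list(range(x1, x2 + 1)) or list(range(x1, x2 - 1, -1))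
      let r := PySem.List.pyRange x1 (x2 + 1) 1
      let xs := if r = [] then PySem.List.pyRange x1 (x2 - 1) (-1) else r
      let sy : Int := if y2 > y1 then 1 else -1
      (PySem.List.enumerate xs 0).map (fun p => (p.2, y1 + p.1 * sy))
  | _ => []  -- unreachable under Pre_ (Python raises unpacking the segment)

-- pairs comprehension, dict.fromkeys dedup (= PySem.List.dedup), then the gathering dict comprehension
def apply_points_alt (line_segments : List (List Int)) : List (Int × Int × List (List Int)) :=
  let pairs := line_segments.flatMap (fun seg => (pvPointsB seg).map (fun pt => (pt, seg)))
  let keys := PySem.List.dedup (pairs.map (·.1))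
  let grid := keys.foldl
    (fun d pt => d.insert pt ((pairs.filter (fun q => q.1 == pt)).map (·.2))) PySem.Dict.empty
  grid.items.map (fun p => (p.1.1, p.1.2, p.2))

-- ===== PRECONDITION & SPEC =====
-- Pre_ excludes segments that are not exactly 4 numbers: Python A raises ValueError unpacking them (B raises there too).
def Pre_apply_points (line_segments : List (List Int)) : Prop :=
  ∀ seg ∈ line_segments, seg.length = 4
instance (line_segments : List (List Int)) : Decidable (Pre_apply_points line_segments) := by
  unfold Pre_apply_points; infer_instance

def pvWitness_apply_points : List (List Int) := [[0, 9, 5, 9], [8, 0, 0, 8], [3, 4, 3, 1]]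

def Spec_apply_points (line_segments : List (List Int)) (out : List (Int × Int × List (List Int))) : Prop := out = apply_points_alt line_segments
instance (line_segments : List (List Int)) (out : List (Int × Int × List (List Int))) : Decidable (Spec_apply_points line_segments out) := by unfold Spec_apply_points; infer_instance

-- ===== CLAIM (what is proved, stated in full; the proofs are below) =====
def Claim_equal_apply_points : Prop := ∀ (line_segments : List (List Int)), Dom_apply_points line_segments → Pre_apply_points line_segments → Spec_apply_points line_segments (apply_points line_segments)

-- ===== LEMMAS AND PROOFS =====

-- diagonal point-list equality
lemma pvPoints_diag (x1 y1 x2 y2 : Int) (hx : x1 ≠ x2) (hy : y1 ≠ y2) :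
    pvPointsB [x1, y1, x2, y2]
      = (PySem.List.pyRange 0 (max x1 x2 - min x1 x2 + 1) 1).map
          (fun s => (x1 + s * (if x1 > x2 then -1 else 1), y1 + s * (if y1 > y2 then -1 else 1))) := by
  have hsy : (if y2 > y1 then (1:Int) else -1) = (if y1 > y2 then -1 else 1) := by
    rcases lt_trichotomy y1 y2 with h | h | h
    · simp [h, lt_asymm h]
    · omega
    · simp [h, lt_asymm h]
  simp only [pvPointsB, if_neg (show ¬(x1 = x2 ∨ y1 = y2) by tauto), hsy]
  rcases lt_or_gt_of_ne hx with h | h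
  · -- ascending x-range
    have hr : PySem.List.pyRange x1 (x2 + 1) 1 ≠ [] := by
      exact List.ne_nil_of_mem (PySem.List.mem_pyRange_one.2 (by omega : x1 ≤ x1 ∧ x1 < x2 + 1))
    rw [if_neg hr, PySem.List.enumerate_eq_map_pyRange _ 0, List.map_map]
    have hlen : (PySem.List.len (PySem.List.pyRange x1 (x2 + 1) 1)) = max x1 x2 - min x1 x2 + 1 := by
      simp [pysem, PySem.List.length_pyRange_one]; omega
    rw [hlen]
    apply List.map_congr_left
    intro j hj
    obtain ⟨hj0, hj1⟩ := PySem.List.mem_pyRange_one.1 hj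
    have hjl : j < ((PySem.List.pyRange x1 (x2 + 1) 1).length : Int) := by
      rw [PySem.List.length_pyRange_one]; omega
    simp only [Function.comp]
    rw [PySem.List.pyGetD_eq_getElem _ 0 hj0 hjl, PySem.List.getElem_pyRange_one]
    have hjt : (j.toNat : Int) = j := Int.toNat_of_nonneg hj0
    simp [hjt, if_neg (by omega : ¬ x1 > x2)]
  · -- descending x-range
    have hr : PySem.List.pyRange x1 (x2 + 1) 1 = [] := PySem.List.pyRange_one_eq_nil (by omega)
    rw [if_pos hr, PySem.List.enumerate_eq_map_pyRange _ 0, List.map_map]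
    have hlen : (PySem.List.len (PySem.List.pyRange x1 (x2 - 1) (-1))) = max x1 x2 - min x1 x2 + 1 := by
      rw [PySem.List.pyRange_neg_one]
      simp [pysem]; omega
    rw [hlen]
    apply List.map_congr_left
    intro j hj
    obtain ⟨hj0, hj1⟩ := PySem.List.mem_pyRange_one.1 hj
    have hjt : (j.toNat : Int) = j := Int.toNat_of_nonneg hj0
    have hjl : j < ((PySem.List.pyRange x1 (x2 - 1) (-1)).length : Int) := by
      rw [PySem.List.pyRange_neg_one]; simp; omega
    simp only [Function.comp]
    rw [PySem.List.pyGetD_eq_getElem _ 0 hj0 hjl]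
    rw [List.getElem_of_eq (PySem.List.pyRange_neg_one x1 (x2 - 1))]
    simp [List.getElem_map, List.getElem_range, hjt, if_pos (by omega : x1 > x2)]
    omega

lemma pvStep_eq (g : PySem.Dict (Int × Int) (List (List Int))) (seg : List Int) :
    pvStepA g seg
      = (pvPointsB seg).foldl (fun d pt => d.modify pt [] (· ++ [seg])) g := by
  match seg with
  | [] | [_] | [_, _] | [_, _, _] | _ :: _ :: _ :: _ :: _ :: _ => rfl
  | [x1, y1, x2, y2] =>
    by_cases hx : x1 = x2
    · subst hx
      simp [pvStepA, pvPointsB, PySem.List.pyRange_one_singleton, List.foldl_map]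
    · by_cases hy : y1 = y2
      · subst hy
        have h1 : ¬(min x1 x2 = max x1 x2) := by omega
        simp [pvStepA, pvPointsB, h1, hx, PySem.List.pyRange_one_singleton]
        rw [← List.map_eq_flatMap, List.foldl_map]
      · have h1 : ¬(min x1 x2 = max x1 x2) := by omega
        have h2 : ¬(min y1 y2 = max y1 y2) := by omega
        rw [pvPoints_diag x1 y1 x2 y2 hx hy, List.foldl_map]
        simp [pvStepA, h1, h2]

-- the whole of A's fold equals B's staged pipeline
lemma pvMain (ls : List (List Int)) : apply_points ls = apply_points_alt ls := by
  simp only [apply_points, apply_points_alt]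
  have hfold : ls.foldl pvStepA PySem.Dict.empty
      = (ls.flatMap (fun seg => (pvPointsB seg).map (fun pt => (pt, seg)))).foldl
          (fun d p => d.modify p.1 [] (· ++ [p.2])) PySem.Dict.empty := by
    rw [List.foldl_flatMap]
    apply PySem.List.foldl_congr_mem
    intro acc seg _
    rw [List.foldl_map]
    exact pvStep_eq acc seg
  rw [hfold]
  set pairs := ls.flatMap (fun seg => (pvPointsB seg).map (fun pt => (pt, seg))) with hpairs
  set d := pairs.foldl (fun d p => d.modify p.1 [] (· ++ [p.2])) PySem.Dict.empty with hd
  have hnd : d.keys.Nodup :=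
    PySem.Dict.nodup_keys_foldl_modify_key pairs (fun p => p.1) [] (fun _ p => (· ++ [p.2]))
      PySem.Dict.empty PySem.Dict.nodup_keys_empty
  have hkeys : d.keys = PySem.List.dedup (pairs.map (fun p => p.1)) := by
    rw [hd, PySem.Dict.keys_foldl_modify_key pairs (fun p => p.1) [] (fun _ p => (· ++ [p.2]))
      PySem.Dict.empty, PySem.Dict.keys_empty, PySem.List.dedup_eq_ofList]
    rfl
  have hitems : d.items = (PySem.List.dedup (pairs.map (fun p => p.1))).map
      (fun k => (k, (pairs.filter (fun p => p.1 == k)).map (fun p => p.2))) := by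
    rw [PySem.Dict.items_eq_map_keys d hnd [], hkeys]
    apply List.map_congr_left
    intro k _
    rw [hd, PySem.Dict.getD_foldl_modify_append pairs PySem.Dict.empty k]
    simp
  have halt : ((PySem.List.dedup (pairs.map (fun p => p.1))).foldl
      (fun d pt => d.insert pt ((pairs.filter (fun q => q.1 == pt)).map (fun p => p.2)))
      PySem.Dict.empty).items
      = (PySem.List.dedup (pairs.map (fun p => p.1))).map
          (fun k => (k, (pairs.filter (fun p => p.1 == k)).map (fun p => p.2))) := by
    rw [PySem.Dict.items_foldl_insert_fresh _ (fun pt => pt)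
      (fun pt => (pairs.filter (fun q => q.1 == pt)).map (fun p => p.2)) PySem.Dict.empty
      (by intro a _; simp) (by simp)]
    simp
    rfl
  rw [hitems, halt]

-- ===== VERDICT (by name: the statement is the Claim_ definition above) =====
theorem apply_points_spec : Claim_equal_apply_points := by
  intro ls _ _
  unfold Spec_apply_points
  exact pvMain ls
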